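-- pv_equiv track=rewrite | github.com/ashleyliu0407/Zhaosiya-Liu-NeuroMesh-Interview | q2.py | parenthesesTest
-- ===== SOURCE A (Python) =====
-- def parenthesesTest(string):
--     stack = []
--     output = [' '] * len(string)
--
--     for i, char in enumerate(string):
--         if char == '(':
--             stack.append(i)
--         elif char == ')':
--             if stack:
--                 stack.pop()
--             else:
--                 output[i] = '?'
--
--     while stack:
--         output[stack.pop()] = 'x'
--
--     return ''.join(output)
-- ===== SOURCE B (Python) =====
-- def parenthesesTest(string):
--     output = [' '] * len(string)
--     balance = 0
--     for i, char in enumerate(string):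
--         if char == '(':
--             balance += 1
--         elif char == ')':
--             if balance == 0:
--                 output[i] = '?'
--             else:
--                 balance -= 1
--     balance = 0
--     for i in range(len(string) - 1, -1, -1):
--         char = string[i]
--         if char == ')':
--             balance += 1
--         elif char == '(':
--             if balance == 0:
--                 output[i] = 'x'
--             else:
--                 balance -= 1
--     return ''.join(output)
-- ===== Notes on version B (the rewrite author's own statement) =====
-- stated objective: alternative
-- what changed: Replaces the index stack and the final while-pop loop with two integer-counter passes: a forward open-balance pass marking unmatched closing parentheses and a backward close-balance pass marking unmatched opening parentheses, storing only a counter instead of a stack of indices.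
import Mathlib
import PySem

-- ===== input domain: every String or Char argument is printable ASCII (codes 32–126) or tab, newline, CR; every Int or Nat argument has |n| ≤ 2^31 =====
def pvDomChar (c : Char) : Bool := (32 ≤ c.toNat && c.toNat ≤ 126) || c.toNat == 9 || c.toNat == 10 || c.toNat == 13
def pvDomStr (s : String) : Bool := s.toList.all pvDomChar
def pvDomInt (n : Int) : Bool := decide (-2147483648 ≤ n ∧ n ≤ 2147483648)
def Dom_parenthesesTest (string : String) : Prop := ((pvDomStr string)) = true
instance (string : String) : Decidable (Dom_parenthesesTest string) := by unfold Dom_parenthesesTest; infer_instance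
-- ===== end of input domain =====

-- B replaces A's index stack and final pop-loop with two integer-counter passes
-- (forward marks unmatched ')', backward marks unmatched '('); objective: alternative algorithm, same O(n) cost.


-- ===== PORT A =====
-- A's main loop: stack of indices of unmatched '(' (head = most recently pushed),
-- output list mutated at unmatched-')' positions.
def aLoop : List Char → Nat → List Nat → List Char → List Nat × List Char
  | [], _, stack, out => (stack, out)
  | c :: rest, i, stack, out =>
    if c = '(' then aLoop rest (i+1) (i :: stack) out
    else if c = ')' then
      match stack with
      | [] => aLoop rest (i+1) [] (out.set i '?')
      | _ :: t => aLoop rest (i+1) t out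
    else aLoop rest (i+1) stack out

def parenthesesTest (string : String) : String :=
  let cs := string.toList
  let r := aLoop cs 0 [] (List.replicate cs.length ' ')
  -- the final `while stack: output[stack.pop()] = 'x'` loop (pops top first = head first)
  String.mk (r.1.foldl (fun o p => o.set p 'x') r.2)

-- ===== PORT B =====
-- B's forward pass: open-balance counter, emits the mark for each position ('?' at unmatched ')').
def bForward : List Char → Nat → List Char
  | [], _ => []
  | c :: rest, bal =>
    if c = '(' then ' ' :: bForward rest (bal+1)
    else if c = ')' then
      if bal = 0 then '?' :: bForward rest 0 else ' ' :: bForward rest (bal-1)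
    else ' ' :: bForward rest bal

-- B's backward pass (right-to-left loop = recursion processing the rest first):
-- close-balance counter, overwrites the mark of an unmatched '(' with 'x'.
def bBackward : List (Char × Char) → List Char × Nat
  | [] => ([], 0)
  | (c, m) :: rest =>
    let r := bBackward rest
    if c = ')' then (m :: r.1, r.2 + 1)
    else if c = '(' then
      if r.2 = 0 then ('x' :: r.1, 0) else (m :: r.1, r.2 - 1)
    else (m :: r.1, r.2)

def parenthesesTest_alt (string : String) : String :=
  let cs := string.toList
  String.mk (bBackward (cs.zip (bForward cs 0))).1

-- ===== PRECONDITION & SPEC =====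
def Spec_parenthesesTest (string : String) (out : String) : Prop := out = parenthesesTest_alt string
instance (string : String) (out : String) : Decidable (Spec_parenthesesTest string out) := by unfold Spec_parenthesesTest; infer_instance

-- ===== CLAIM (what is proved, stated in full; the proofs are below) =====
def Claim_equal_parenthesesTest : Prop := ∀ (string : String), Dom_parenthesesTest string → Spec_parenthesesTest string (parenthesesTest string)

-- ===== LEMMAS AND PROOFS =====

-- replace the first '?' (if any) by ' '
def rf : List Char → List Char
  | [] => []
  | c :: t => if c = '?' then ' ' :: t else c :: rf t

-- the common specification: marks of the whole string, defined by prepending one char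
def S : List Char → List Char
  | [] => []
  | c :: l =>
    if c = ')' then '?' :: S l
    else if c = '(' then (if '?' ∈ S l then ' ' :: rf (S l) else 'x' :: S l)
    else ' ' :: S l

theorem rf_length : ∀ (x : List Char), (rf x).length = x.length := by
  intro x
  induction x with
  | nil => rfl
  | cons c t ih => by_cases h : c = '?' <;> simp [rf, h, ih]

theorem rf_of_not_mem : ∀ (x : List Char), '?' ∉ x → rf x = x := by
  intro x hx
  induction x with
  | nil => rfl
  | cons c t ih =>
    simp only [List.mem_cons, not_or] at hx
    have hc : ¬ c = '?' := fun h => hx.1 h.symm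
    simp [rf, hc, ih hx.2]

theorem count_rf_mem : ∀ (x : List Char), '?' ∈ x → List.count '?' (rf x) = List.count '?' x - 1 := by
  intro x hx
  induction x with
  | nil => simp at hx
  | cons c t ih =>
    by_cases h : c = '?'
    · subst h
      simp [rf, List.count_cons]
    · have ht : '?' ∈ t := by
        rcases List.mem_cons.mp hx with h1 | h1
        · exact absurd h1.symm h
        · exact h1
      have hpos : 0 < List.count '?' t := List.count_pos_iff.mpr ht
      simp only [rf, if_neg h]
      rw [List.count_cons, List.count_cons, ih ht]
      have hne : (c == '?') = false := beq_eq_false_iff_ne.mpr h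
      rw [hne]
      omega

-- ---- B side ----

theorem bForward_succ : ∀ (l : List Char) (b : Nat), bForward l (b+1) = rf (bForward l b) := by
  intro l
  induction l with
  | nil => intro b; rfl
  | cons c r ih =>
    intro b
    by_cases h1 : c = '('
    · simp [bForward, h1, rf, ih (b+1)]
    · by_cases h2 : c = ')'
      · cases b with
        | zero => simp [bForward, h1, h2, rf]
        | succ k => simp [bForward, h1, h2, rf, ih k]
      · simp [bForward, h1, h2, rf, ih b]

def cbal : List Char → Nat
  | [] => 0
  | c :: r => if c = ')' then cbal r + 1 else if c = '(' then (if cbal r = 0 then 0 else cbal r - 1) else cbal r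

theorem bBackward_snd : ∀ (l : List Char) (b : Nat), (bBackward (l.zip (bForward l b))).2 = cbal l := by
  intro l
  induction l with
  | nil => intro b; rfl
  | cons c r ih =>
    intro b
    by_cases h1 : c = '('
    · by_cases hz : cbal r = 0
      · simp [bForward, h1, bBackward, cbal, ih (b+1), hz]
      · simp [bForward, h1, bBackward, cbal, ih (b+1), hz]
    · by_cases h2 : c = ')'
      · cases b with
        | zero => simp [bForward, h1, h2, bBackward, cbal, ih 0]
        | succ k => simp [bForward, h1, h2, bBackward, cbal, ih k]
      · simp [bForward, h1, h2, bBackward, cbal, ih b]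

theorem cbal_count : ∀ (l : List Char), cbal l = List.count '?' (bForward l 0) := by
  intro l
  induction l with
  | nil => rfl
  | cons c r ih =>
    by_cases h1 : c = '('
    · have e1 : cbal (c :: r) = if cbal r = 0 then 0 else cbal r - 1 := by
        simp [cbal, h1]
      have e2 : bForward (c :: r) 0 = ' ' :: rf (bForward r 0) := by
        simp [bForward, h1, bForward_succ r 0]
      rw [e1, e2, List.count_cons]
      by_cases hm : '?' ∈ bForward r 0
      · have hpos : 0 < List.count '?' (bForward r 0) := List.count_pos_iff.mpr hm
        rw [count_rf_mem _ hm]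
        have e3 : (' ' == '?') = false := by decide
        rw [e3, ih, if_neg hpos.ne']
        simp
      · have h0 : List.count '?' (bForward r 0) = 0 := List.count_eq_zero.mpr hm
        rw [rf_of_not_mem _ hm, h0, ih, h0]
        simp
    · by_cases h2 : c = ')'
      · simp [cbal, bForward, h1, h2, List.count_cons, ih]
      · simp [cbal, bForward, h1, h2, List.count_cons, ih]

def Bmarks (l : List Char) (b : Nat) : List Char := (bBackward (l.zip (bForward l b))).1

theorem mem_Bmarks : ∀ (l : List Char) (b : Nat), '?' ∈ Bmarks l b ↔ '?' ∈ bForward l b := by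
  intro l
  induction l with
  | nil => intro b; rfl
  | cons c r ih =>
    intro b
    by_cases h1 : c = '('
    · have ih' := ih (b+1)
      simp only [Bmarks] at ih'
      by_cases hz : (bBackward (r.zip (bForward r (b+1)))).2 = 0
      · simp [Bmarks, bForward, h1, bBackward, hz, ih']
      · simp [Bmarks, bForward, h1, bBackward, hz, ih']
    · by_cases h2 : c = ')'
      · cases b with
        | zero =>
          have ih' := ih 0; simp only [Bmarks] at ih'
          simp [Bmarks, bForward, h1, h2, bBackward, ih']
        | succ k =>
          have ih' := ih k; simp only [Bmarks] at ih'
          simp [Bmarks, bForward, h1, h2, bBackward, ih']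
      · have ih' := ih b; simp only [Bmarks] at ih'
        simp [Bmarks, bForward, h1, h2, bBackward, ih']

theorem Bmarks_succ : ∀ (l : List Char) (b : Nat), Bmarks l (b+1) = rf (Bmarks l b) := by
  intro l
  induction l with
  | nil => intro b; rfl
  | cons c r ih =>
    intro b
    by_cases h1 : c = '('
    · have hsnd : ∀ b', (bBackward (r.zip (bForward r b'))).2 = cbal r := fun b' => bBackward_snd r b'
      have ih' := ih (b+1); simp only [Bmarks] at ih'
      by_cases hz : cbal r = 0
      · simp [Bmarks, bForward, h1, bBackward, hsnd, hz, rf, ih']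
      · simp [Bmarks, bForward, h1, bBackward, hsnd, hz, rf, ih']
    · by_cases h2 : c = ')'
      · cases b with
        | zero => simp [Bmarks, bForward, h1, h2, bBackward, rf]
        | succ k =>
          have ih' := ih k; simp only [Bmarks] at ih'
          simp [Bmarks, bForward, h1, h2, bBackward, rf, ih']
      · have ih' := ih b; simp only [Bmarks] at ih'
        simp [Bmarks, bForward, h1, h2, bBackward, rf, ih']

theorem Bmarks_eq_S : ∀ (l : List Char), Bmarks l 0 = S l := by
  intro l
  induction l with
  | nil => rfl
  | cons c r ih =>
    by_cases h1 : c = '('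
    · have hsnd := bBackward_snd r 1
      have htail : (bBackward (r.zip (bForward r 1))).1 = rf (S r) := by
        have h := Bmarks_succ r 0
        rw [ih] at h
        simpa [Bmarks] using h
      have hmem : '?' ∈ S r ↔ ¬ cbal r = 0 := by
        rw [← ih, mem_Bmarks r 0, cbal_count r]
        constructor
        · intro hm; exact (List.count_pos_iff.mpr hm).ne'
        · intro hne
          exact List.count_pos_iff.mp (Nat.pos_of_ne_zero hne)
      by_cases hz : cbal r = 0
      · have hnm : '?' ∉ S r := fun hm => (hmem.mp hm) hz
        have : S (c :: r) = 'x' :: S r := by simp [S, h1, hnm]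
        rw [this]
        simp [Bmarks, bForward, h1, bBackward, hsnd, hz, htail, rf_of_not_mem _ hnm]
      · have hm : '?' ∈ S r := hmem.mpr hz
        have : S (c :: r) = ' ' :: rf (S r) := by simp [S, h1, hm]
        rw [this]
        simp [Bmarks, bForward, h1, bBackward, hsnd, hz, htail]
    · by_cases h2 : c = ')'
      · simp only [Bmarks] at ih
        simp [Bmarks, bForward, h1, h2, bBackward, S, ih]
      · simp only [Bmarks] at ih
        simp [Bmarks, bForward, h1, h2, bBackward, S, ih]

-- ---- A side ----

-- write marks into `out` starting at index i, skipping ' '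
def wr : List Char → Nat → List Char → List Char
  | out, _, [] => out
  | out, i, m :: ms => wr (if m = ' ' then out else out.set i m) (i+1) ms

def sx (stack : List Nat) (out : List Char) : List Char := stack.foldl (fun o p => o.set p 'x') out

theorem rfIter_cons_ne : ∀ (m : Nat) (c : Char) (x : List Char), c ≠ '?' → rf^[m] (c :: x) = c :: rf^[m] x := by
  intro m
  induction m with
  | zero => intro c x _; rfl
  | succ k ih =>
    intro c x hc
    rw [Function.iterate_succ_apply, Function.iterate_succ_apply]
    rw [show rf (c :: x) = c :: rf x by simp [rf, hc]]
    exact ih c (rf x) hc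

theorem rfIter_of_not_mem : ∀ (m : Nat) (x : List Char), '?' ∉ x → rf^[m] x = x := by
  intro m
  induction m with
  | zero => intro x _; rfl
  | succ k ih =>
    intro x hx
    rw [Function.iterate_succ_apply, rf_of_not_mem x hx, ih x hx]

theorem wr_set_lt : ∀ (ms : List Char) (out : List Char) (i j : Nat) (v : Char), j < i →
    wr (out.set j v) i ms = (wr out i ms).set j v := by
  intro ms
  induction ms with
  | nil => intro out i j v _; rfl
  | cons m t ih =>
    intro out i j v hj
    by_cases hm : m = ' '
    · simp only [wr, if_pos hm]
      exact ih out (i+1) j v (Nat.lt_succ_of_lt hj)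
    · simp only [wr, if_neg hm]
      rw [List.set_comm _ _ (by omega : j ≠ i)]
      exact ih (out.set i m) (i+1) j v (Nat.lt_succ_of_lt hj)

theorem aLoop_main : ∀ (l : List Char) (i : Nat) (stack : List Nat) (out : List Char),
    sx (aLoop l i stack out).1 (aLoop l i stack out).2
      = sx (stack.drop (min (List.count '?' (S l)) stack.length))
           (wr out i (rf^[stack.length] (S l))) := by
  intro l
  induction l with
  | nil => intro i stack out; simp [aLoop, S, wr, rfIter_of_not_mem]
  | cons c r ihl =>
    intro i stack out
    by_cases h1 : c = '('
    · rw [show aLoop (c :: r) i stack out = aLoop r (i+1) (i :: stack) out by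
        simp [aLoop, h1]]
      rw [ihl (i+1) (i :: stack) out]
      by_cases hm : '?' ∈ S r
      · have hpos : 0 < List.count '?' (S r) := List.count_pos_iff.mpr hm
        have hS : S (c :: r) = ' ' :: rf (S r) := by simp [S, h1, hm]
        rw [hS]
        have hcount : List.count '?' (' ' :: rf (S r)) = List.count '?' (S r) - 1 := by
          rw [List.count_cons, count_rf_mem _ hm]
          simp
        rw [rfIter_cons_ne stack.length ' ' (rf (S r)) (by decide)]
        rw [show (rf^[stack.length] (rf (S r))) = rf^[stack.length + 1] (S r) from
          (Function.iterate_succ_apply rf stack.length (S r)).symm]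
        rw [show wr out i (' ' :: rf^[stack.length + 1] (S r))
              = wr out (i+1) (rf^[stack.length + 1] (S r)) by simp [wr]]
        rw [hcount]
        congr 1
        rw [show min (List.count '?' (S r)) (i :: stack).length
              = min (List.count '?' (S r) - 1) stack.length + 1 by
          simp only [List.length_cons]; omega]
        rfl
      · have h0 : List.count '?' (S r) = 0 := List.count_eq_zero.mpr hm
        have hS : S (c :: r) = 'x' :: S r := by simp [S, h1, hm]
        rw [hS]
        have hcount : List.count '?' ('x' :: S r) = 0 := by
          rw [List.count_cons, h0]; simp
        rw [hcount]
        rw [rfIter_cons_ne stack.length 'x' (S r) (by decide)]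
        rw [rfIter_of_not_mem stack.length (S r) hm]
        rw [show wr out i ('x' :: S r) = wr (out.set i 'x') (i+1) (S r) by
          simp [wr]]
        rw [show rf^[(i :: stack).length] (S r) = S r from rfIter_of_not_mem _ _ hm]
        rw [h0]
        simp only [Nat.zero_min, List.drop_zero]
        rw [show sx (i :: stack) (wr out (i+1) (S r)) = sx stack ((wr out (i+1) (S r)).set i 'x') from rfl]
        rw [← wr_set_lt (S r) out (i+1) i 'x' (Nat.lt_succ_self i)]
    · by_cases h2 : c = ')'
      · cases stack with
        | nil =>
          rw [show aLoop (c :: r) i [] out = aLoop r (i+1) [] (out.set i '?') by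
            simp [aLoop, h1, h2]]
          rw [ihl (i+1) [] (out.set i '?')]
          have hS : S (c :: r) = '?' :: S r := by simp [S, h1, h2]
          rw [hS]
          simp only [List.length_nil, Nat.min_zero, List.drop_nil, Function.iterate_zero, id]
          rw [show wr out i ('?' :: S r) = wr (out.set i '?') (i+1) (S r) by
            simp [wr]]
        | cons p t =>
          rw [show aLoop (c :: r) i (p :: t) out = aLoop r (i+1) t out by
            simp [aLoop, h1, h2]]
          rw [ihl (i+1) t out]
          have hS : S (c :: r) = '?' :: S r := by simp [S, h1, h2]
          rw [hS]
          have hit : rf^[(p :: t).length] ('?' :: S r) = ' ' :: rf^[t.length] (S r) := by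
            rw [List.length_cons, Function.iterate_succ_apply]
            rw [show rf ('?' :: S r) = ' ' :: S r by simp [rf]]
            exact rfIter_cons_ne t.length ' ' (S r) (by decide)
          rw [hit]
          rw [show wr out i (' ' :: rf^[t.length] (S r))
                = wr out (i+1) (rf^[t.length] (S r)) by simp [wr]]
          congr 1
          rw [List.count_cons]
          simp only [List.length_cons]
          rw [show (List.count '?' (S r) + if ('?' == '?') = true then 1 else 0) ⊓ (t.length + 1)
                = (List.count '?' (S r)) ⊓ t.length + 1 by
            simp [Nat.succ_min_succ]]
          rfl
      · rw [show aLoop (c :: r) i stack out = aLoop r (i+1) stack out by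
          simp [aLoop, h1, h2]]
        rw [ihl (i+1) stack out]
        have hS : S (c :: r) = ' ' :: S r := by simp [S, h1, h2]
        rw [hS]
        rw [rfIter_cons_ne stack.length ' ' (S r) (by decide)]
        rw [show wr out i (' ' :: rf^[stack.length] (S r))
              = wr out (i+1) (rf^[stack.length] (S r)) by simp [wr]]
        rw [List.count_cons]
        simp

theorem set_append_len : ∀ (pre rest : List Char) (a v : Char),
    (pre ++ a :: rest).set pre.length v = pre ++ v :: rest := by
  intro pre
  induction pre with
  | nil => intro rest a v; rfl
  | cons b t ih => intro rest a v; simp [List.set, ih rest a v]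

theorem wr_replicate : ∀ (ms pre : List Char), wr (pre ++ List.replicate ms.length ' ') pre.length ms = pre ++ ms := by
  intro ms
  induction ms with
  | nil => intro pre; simp [wr]
  | cons m t ih =>
    intro pre
    rw [List.length_cons, List.replicate_succ]
    by_cases hm : m = ' '
    · rw [show wr (pre ++ ' ' :: List.replicate t.length ' ') pre.length (m :: t)
            = wr (pre ++ ' ' :: List.replicate t.length ' ') (pre.length + 1) t by
        simp [wr, hm]]
      have := ih (pre ++ [' '])
      simp only [List.append_assoc, List.singleton_append, List.length_append,
        List.length_cons, List.length_nil] at this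
      rw [show pre.length + 1 = pre.length + (0 + 1) by omega] at this ⊢
      rw [this, hm]
    · rw [show wr (pre ++ ' ' :: List.replicate t.length ' ') pre.length (m :: t)
            = wr ((pre ++ ' ' :: List.replicate t.length ' ').set pre.length m) (pre.length + 1) t by
        simp [wr, hm]]
      rw [set_append_len]
      have := ih (pre ++ [m])
      simp only [List.append_assoc, List.singleton_append, List.length_append,
        List.length_cons, List.length_nil] at this
      rw [show pre.length + 1 = pre.length + (0 + 1) by omega] at this ⊢
      rw [this]

theorem S_length : ∀ (l : List Char), (S l).length = l.length := by
  intro l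
  induction l with
  | nil => rfl
  | cons c r ih =>
    by_cases h1 : c = '('
    · by_cases hm : '?' ∈ S r <;> simp [S, h1, hm, rf_length, ih]
    · by_cases h2 : c = ')' <;> simp [S, h1, h2, ih]

-- ===== VERDICT (by name: the statement is the Claim_ definition above) =====
theorem parenthesesTest_spec : Claim_equal_parenthesesTest := by
  intro s _
  show parenthesesTest s = parenthesesTest_alt s
  unfold parenthesesTest parenthesesTest_alt
  have h := aLoop_main s.toList 0 [] (List.replicate s.toList.length ' ')
  simp only [List.length_nil, Nat.min_zero, List.drop_zero, Function.iterate_zero, id] at h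
  have hw : wr (List.replicate s.toList.length ' ') 0 (S s.toList) = S s.toList := by
    have h2 := wr_replicate (S s.toList) []
    simpa [S_length] using h2
  have hA : (aLoop s.toList 0 [] (List.replicate s.toList.length ' ')).1.foldl
      (fun o p => o.set p 'x') (aLoop s.toList 0 [] (List.replicate s.toList.length ' ')).2
      = S s.toList := by
    rw [show (aLoop s.toList 0 [] (List.replicate s.toList.length ' ')).1.foldl
          (fun o p => o.set p 'x') (aLoop s.toList 0 [] (List.replicate s.toList.length ' ')).2
        = sx (aLoop s.toList 0 [] (List.replicate s.toList.length ' ')).1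
            (aLoop s.toList 0 [] (List.replicate s.toList.length ' ')).2 from rfl]
    rw [h]
    rw [show sx [] (wr (List.replicate s.toList.length ' ') 0 (S s.toList))
        = wr (List.replicate s.toList.length ' ') 0 (S s.toList) from rfl]
    exact hw
  have hB : (bBackward (s.toList.zip (bForward s.toList 0))).1 = S s.toList :=
    Bmarks_eq_S s.toList
  simp only [hA, hB]
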